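-- pv_equiv track=rewrite | github.com/dkanzariya/Python | GFG.py | replace_adjacent_duplicates
-- ===== SOURCE A (Python) =====
-- def replace_adjacent_duplicates(s):
--     if not s:
--         return s  # Return an empty string if the input is empty
--
--     result = [s[0]]  # Initialize the result with the first character of s
--     for i in range(1, len(s)):
--         if s[i] == s[i - 1]:  # Check if the current character is the same as the previous one
--             result.pop()  # Remove the previous character from the result
--             result.append(s[i].upper())  # Add the uppercase version of the current character
--         else:
--             result.append(s[i])  # Add the current character to the result
--
--     return ''.join(result)  # Convert the list back to a string and return it
-- ===== SOURCE B (Python) =====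
-- def replace_adjacent_duplicates(s):
--     out = []
--     i = 0
--     n = len(s)
--     while i < n:
--         j = i
--         while j < n and s[j] == s[i]:
--             j += 1
--         out.append(s[i] if j - i == 1 else s[i].upper())
--         i = j
--     return ''.join(out)
-- ===== Notes on version B (the rewrite author's own statement) =====
-- stated objective: alternative
-- what changed: Replaces A's index loop with pop/append result surgery by a two-pointer run scan: find each maximal run of equal characters and emit one character per run (plain if the run has length 1, uppercased otherwise).
import Mathlib
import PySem

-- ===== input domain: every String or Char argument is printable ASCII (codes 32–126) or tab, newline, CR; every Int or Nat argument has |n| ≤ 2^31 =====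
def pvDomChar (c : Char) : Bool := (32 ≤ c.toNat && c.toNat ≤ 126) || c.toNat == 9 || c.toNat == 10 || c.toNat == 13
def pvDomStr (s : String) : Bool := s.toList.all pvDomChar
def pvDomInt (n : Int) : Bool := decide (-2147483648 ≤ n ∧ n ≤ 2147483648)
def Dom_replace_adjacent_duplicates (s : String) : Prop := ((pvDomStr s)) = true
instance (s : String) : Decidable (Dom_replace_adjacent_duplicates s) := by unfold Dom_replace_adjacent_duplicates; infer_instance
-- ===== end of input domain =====

-- B replaces A's pop/append state machine by a maximal-run scan (one output char per run); same O(n) cost.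

-- ===== PORT A =====
-- A: result starts as [s[0]]; for i in range(1, len(s)): pop+append upper on equality, else append.
def replace_adjacent_duplicates (s : String) : String :=
  if s.toList = [] then s
  else
    String.mk
      ((List.range' 1 (s.toList.length - 1)).foldl
        (fun r i =>
          if s.toList.getD i ' ' = s.toList.getD (i - 1) ' ' then
            r.dropLast ++ [PySem.Chars.upperChar (s.toList.getD i ' ')]
          else
            r ++ [s.toList.getD i ' '])
        [s.toList.getD 0 ' '])

-- ===== PORT B =====
-- inner while: count how many further chars equal c, return (count, rest)
def pvScan (c : Char) : List Char → Nat × List Char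
  | [] => (0, [])
  | x :: xs => if x = c then let (k, r) := pvScan c xs; (k + 1, r) else (0, x :: xs)

theorem pvScan_len (c : Char) : ∀ xs : List Char, (pvScan c xs).2.length ≤ xs.length := by
  intro xs
  induction xs with
  | nil => simp [pvScan]
  | cons x xs ih =>
    by_cases h : x = c <;> simp [pvScan, h]
    · exact Nat.le_trans ih (Nat.le_succ _)

-- outer while: one output char per maximal run
def pvRuns : List Char → List Char
  | [] => []
  | c :: xs =>
    let p := pvScan c xs
    (if p.1 = 0 then [c] else [PySem.Chars.upperChar c]) ++ pvRuns p.2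
termination_by l => l.length
decreasing_by
  simpa using Nat.lt_succ_of_le (pvScan_len c xs)

def replace_adjacent_duplicates_alt (s : String) : String :=
  String.mk (pvRuns s.toList)

-- ===== PRECONDITION & SPEC =====
def Spec_replace_adjacent_duplicates (s : String) (out : String) : Prop := out = replace_adjacent_duplicates_alt s
instance (s : String) (out : String) : Decidable (Spec_replace_adjacent_duplicates s out) := by unfold Spec_replace_adjacent_duplicates; infer_instance

-- ===== CLAIM (what is proved, stated in full; the proofs are below) =====
def Claim_equal_replace_adjacent_duplicates : Prop := ∀ (s : String), Dom_replace_adjacent_duplicates s → Spec_replace_adjacent_duplicates s (replace_adjacent_duplicates s)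

-- ===== LEMMAS AND PROOFS =====

-- A's loop, recast structurally: process the tail with the previous ORIGINAL char as state
def pvTailFold (r : List Char) (p : Char) : List Char → List Char
  | [] => r
  | c :: xs =>
    if c = p then pvTailFold (r.dropLast ++ [PySem.Chars.upperChar c]) c xs
    else pvTailFold (r ++ [c]) c xs

-- index-fold over range' equals pvTailFold
theorem pvIdxFold (xs : List Char) : ∀ (q : List Char) (p : Char) (r : List Char),
    (List.range' (q.length + 1) xs.length).foldl
      (fun r i =>
        if (q ++ p :: xs).getD i ' ' = (q ++ p :: xs).getD (i - 1) ' ' then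
          r.dropLast ++ [PySem.Chars.upperChar ((q ++ p :: xs).getD i ' ')]
        else r ++ [(q ++ p :: xs).getD i ' '])
      r
    = pvTailFold r p xs := by
  induction xs with
  | nil => intro q p r; simp [pvTailFold]
  | cons c ys ih =>
    intro q p r
    have h1 : (q ++ p :: c :: ys).getD (q.length + 1) ' ' = c := by
      simp [List.getD]
    have h0 : (q ++ p :: c :: ys).getD (q.length + 1 - 1) ' ' = p := by
      simp [List.getD]
    rw [pvTailFold]
    simp only [List.length_cons, List.range'_succ, List.foldl_cons, h1, h0]
    by_cases hc : c = p
    · rw [if_pos hc, if_pos hc]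
      have := ih (q ++ [p]) c (r.dropLast ++ [PySem.Chars.upperChar c])
      simp only [List.length_append, List.length_cons, List.length_nil] at this
      simp only [List.append_cons q p (c :: ys)] at this ⊢
      simpa [Nat.add_assoc] using this
    · rw [if_neg hc, if_neg hc]
      have := ih (q ++ [p]) c (r ++ [c])
      simp only [List.length_append, List.length_cons, List.length_nil] at this
      simp only [List.append_cons q p (c :: ys)] at this ⊢
      simpa [Nat.add_assoc] using this

-- the two run-states of A's loop vs B's runs
theorem pvTailFold_runs : ∀ (xs : List Char) (p : Char) (r : List Char),
    (pvTailFold (r ++ [p]) p xs = r ++ pvRuns (p :: xs)) ∧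
    (pvTailFold (r ++ [PySem.Chars.upperChar p]) p xs
      = r ++ [PySem.Chars.upperChar p] ++ pvRuns (pvScan p xs).2) := by
  intro xs
  induction xs with
  | nil =>
    intro p r
    constructor <;> simp [pvTailFold, pvRuns, pvScan]
  | cons c ys ih =>
    intro p r
    by_cases hc : c = p
    · subst hc
      refine ⟨?_, ?_⟩
      · rw [pvTailFold]
        simp only [List.dropLast_concat]
        rw [(ih c r).2]
        conv_rhs => rw [pvRuns]
        simp only [pvScan]
        cases h : pvScan c ys with
        | mk k rest => simp
      · rw [pvTailFold]
        simp only [List.dropLast_concat]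
        rw [(ih c r).2]
        simp only [pvScan]
        cases h : pvScan c ys with
        | mk k rest => simp
    · refine ⟨?_, ?_⟩
      · simp only [pvTailFold, if_neg hc]
        rw [(ih c (r ++ [p])).1]
        conv_rhs => rw [pvRuns]
        simp only [pvScan, if_neg hc]
        simp
      · simp only [pvTailFold, if_neg hc]
        rw [(ih c (r ++ [PySem.Chars.upperChar p])).1]
        simp only [pvScan, if_neg hc]

-- ===== VERDICT (by name: the statement is the Claim_ definition above) =====
theorem replace_adjacent_duplicates_spec : Claim_equal_replace_adjacent_duplicates := by
  intro s _
  unfold Spec_replace_adjacent_duplicates replace_adjacent_duplicates replace_adjacent_duplicates_alt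
  cases h : s.toList with
  | nil =>
    rw [if_pos rfl, pvRuns]
    exact String.toList_inj.mp (by rw [h]; rfl)
  | cons c xs =>
    simp only [reduceCtorEq, if_false]
    have hidx := pvIdxFold xs [] c [c]
    simp only [List.length_nil, Nat.zero_add, List.nil_append] at hidx
    have hruns := (pvTailFold_runs xs c []).1
    simp only [List.nil_append] at hruns
    simp only [List.length_cons, Nat.add_sub_cancel, List.getD_cons_zero]
    rw [hidx, hruns]
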